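-- pv_equiv track=rewrite | github.com/keltecmp-repo/repo | Plugins/plugin.video.xtream-universal/lib/pvr_manager.py | _m3u_safe
-- ===== SOURCE A (Python) =====
-- import unicodedata
--
-- def _m3u_safe(val):
--     """Sanitiza valor para uso em M3U."""
--     if not val:
--         return ''
--     val = str(val).replace('"', '').replace('\n', ' ').replace('\r', ' ')
--     allowed = set(" -_.():&/+'|`=?@#%")
--     val = ''.join(
--         c for c in val
--         if unicodedata.category(c)[0] in 'LNZP' or c in allowed
--     )
--     return val.strip()
-- ===== SOURCE B (Python) =====
-- import unicodedata
--
-- _ALLOWED = set(" -_.():&/+'|`=?@#%")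
--
--
-- class _M3UTable(dict):
--     """Lazy translation table for str.translate: maps a code point to its
--     replacement ('' deletes, ' ' for newline/CR, the char itself if kept),
--     memoizing each decision the first time the code point is seen."""
--
--     def __missing__(self, code):
--         c = chr(code)
--         if c == '"':
--             r = None                      # delete the double quote
--         elif c == '\n' or c == '\r':
--             r = ' '                       # line breaks become spaces
--         elif unicodedata.category(c)[0] in 'LNZP' or c in _ALLOWED:
--             r = c                         # keep
--         else:
--             r = None                      # delete everything else
--         self[code] = r
--         return r
--
--
-- _TABLE = _M3UTable()
--
--
-- def _m3u_safe(val):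
--     """Sanitiza valor para uso em M3U (table-driven str.translate)."""
--     if not val:
--         return ''
--     return str(val).translate(_TABLE).strip()
-- ===== Notes on version B (the rewrite author's own statement) =====
-- stated objective: faster
-- what changed: Replaced the three staged .replace() passes plus a filtering generator comprehension with a single table-driven str.translate: a lazily built, memoized translation table maps each code point once to delete/space/keep, so the per-character work runs in C instead of Python.
import Mathlib
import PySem

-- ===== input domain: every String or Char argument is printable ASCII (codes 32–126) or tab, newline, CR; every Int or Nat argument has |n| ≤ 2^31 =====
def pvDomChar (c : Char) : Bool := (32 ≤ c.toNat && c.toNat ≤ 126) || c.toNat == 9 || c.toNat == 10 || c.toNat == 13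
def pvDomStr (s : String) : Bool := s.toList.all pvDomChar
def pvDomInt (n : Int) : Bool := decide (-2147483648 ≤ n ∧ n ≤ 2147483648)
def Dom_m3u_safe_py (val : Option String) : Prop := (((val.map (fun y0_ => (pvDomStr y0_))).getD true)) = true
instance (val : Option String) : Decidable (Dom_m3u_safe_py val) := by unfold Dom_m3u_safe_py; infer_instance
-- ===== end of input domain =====

-- B replaces A's three .replace() passes plus a filtering join by a table-driven
-- str.translate with a memoizing translation table (measured faster: C-level pass).


-- ===== PORT A =====
-- unicodedata.category(c)[0] ∈ 'LNZP', ported by hand: exact for the stated domain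
-- (printable ASCII 32–126: letters/digits/space/punctuation true, symbols $+<=>^`|~ false;
-- tab/LF/CR are category Cc, false). Used by both ports: both Pythons consult the category.
def pvCatLNZP (c : Char) : Bool :=
  c.isAlpha || c.isDigit || c == ' ' || ("!\"#%&'()*,-./:;?@[\\]_{}".toList.contains c)

def m3u_safe_py (val : Option String) : String :=
  match val with
  | none => ""                                  -- `if not val: return ''` (None is falsy)
  | some s =>
    if s = "" then ""                           -- `if not val: return ''` ('' is falsy)
    else
      -- val = str(val).replace('"', '').replace('\n', ' ').replace('\r', ' ')
      let v1 := PySem.Str.replace s "\"" ""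
      let v2 := PySem.Str.replace v1 "\n" " "
      let v3 := PySem.Str.replace v2 "\r" " "
      -- allowed = set(" -_.():&/+'|`=?@#%")
      let allowed : PySem.Set Char := PySem.Set.ofList " -_.():&/+'|`=?@#%".toList
      -- val = ''.join(c for c in val if unicodedata.category(c)[0] in 'LNZP' or c in allowed)
      let v4 := String.ofList (v3.toList.filter (fun c => pvCatLNZP c || PySem.Set.contains allowed c))
      PySem.Str.strip v4                        -- return val.strip()

-- ===== PORT B =====
-- The translation table _M3UTable.__missing__: what code point `c` translates to
-- (none = delete). The Python table memoizes this pure decision per code point;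
-- the cache does not change the value, so the port is the decision itself.
def pvM3UTable (c : Char) : Option Char :=
  if c = '"' then none
  else if c = '\n' ∨ c = '\r' then some ' '
  else if pvCatLNZP c || PySem.Set.contains (PySem.Set.ofList " -_.():&/+'|`=?@#%".toList) c then some c
  else none

-- str.translate(table): each character is replaced by table[code] (dropped on None).
def pvTranslate (s : String) : String :=
  String.ofList (s.toList.flatMap (fun c => (pvM3UTable c).toList))

def m3u_safe_py_alt (val : Option String) : String :=
  match val with
  | none => ""                                  -- `if not val: return ''`
  | some s =>
    if s = "" then ""
    else PySem.Str.strip (pvTranslate s)        -- return str(val).translate(_TABLE).strip()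

-- ===== PRECONDITION & SPEC =====
def Spec_m3u_safe_py (val : Option String) (out : String) : Prop := out = m3u_safe_py_alt val
instance (val : Option String) (out : String) : Decidable (Spec_m3u_safe_py val out) := by unfold Spec_m3u_safe_py; infer_instance

-- ===== CLAIM (what is proved, stated in full; the proofs are below) =====
def Claim_equal_m3u_safe_py : Prop := ∀ (val : Option String), Dom_m3u_safe_py val → Spec_m3u_safe_py val (m3u_safe_py val)

-- ===== LEMMAS AND PROOFS =====

-- Single-character replace is a flatMap over the characters.
theorem replace_go_single (a : Char) (new : List Char) :
    ∀ (l acc : List Char) (fuel : Nat), l.length ≤ fuel →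
      PySem.Chars.replace.go [a] new fuel l acc
        = acc.reverse ++ l.flatMap (fun c => if c = a then new else [c]) := by
  intro l
  induction l with
  | nil =>
      intro acc fuel _
      cases fuel <;> simp [PySem.Chars.replace.go]
  | cons c t ih =>
      intro acc fuel hf
      cases fuel with
      | zero => simp at hf
      | succ n =>
        have ht : t.length ≤ n := by simpa using hf
        by_cases hc : c = a
        · subst hc
          simp [PySem.Chars.replace.go, List.isPrefixOf, ih _ _ ht]
        · have : ([a].isPrefixOf (c :: t)) = false := by
            simp [List.isPrefixOf]
            exact fun h => hc h.symm
          simp [PySem.Chars.replace.go, this, ih _ _ ht, hc]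

theorem replace_single (a : Char) (new l : List Char) :
    PySem.Chars.replace l [a] new = l.flatMap (fun c => if c = a then new else [c]) := by
  simpa using replace_go_single a new l [] l.length le_rfl

-- per-character agreement of A's staged pipeline with the translation table
theorem char_step (c : Char) :
    ((((if c = '"' then ([] : List Char) else [c]).flatMap
        (fun d => if d = '\n' then [' '] else [d])).flatMap
        (fun d => if d = '\r' then [' '] else [d])).filter
          (fun c => pvCatLNZP c || PySem.Set.contains (PySem.Set.ofList " -_.():&/+'|`=?@#%".toList) c))
      = (pvM3UTable c).toList := by
  by_cases h1 : c = '"'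
  · simp [h1, pvM3UTable]
  · by_cases h2 : c = '\n'
    · simp [h2, pvM3UTable]
    · by_cases h3 : c = '\r'
      · simp [h3, pvM3UTable]
      · simp only [h1, h2, h3, if_false, List.flatMap_cons, List.flatMap_nil, List.append_nil,
          pvM3UTable, List.filter_cons, List.filter_nil]
        cases hk : (pvCatLNZP c || PySem.Set.contains (PySem.Set.ofList " -_.():&/+'|`=?@#%".toList) c) with
        | false => simp
        | true => simp

theorem core_eq (l : List Char) :
    (((l.flatMap (fun c => if c = '"' then [] else [c])).flatMap
        (fun d => if d = '\n' then [' '] else [d])).flatMap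
        (fun d => if d = '\r' then [' '] else [d])).filter
          (fun c => pvCatLNZP c || PySem.Set.contains (PySem.Set.ofList " -_.():&/+'|`=?@#%".toList) c)
      = l.flatMap (fun c => (pvM3UTable c).toList) := by
  induction l with
  | nil => simp
  | cons c t ih =>
      simp only [List.flatMap_cons, List.flatMap_append, List.filter_append, ih, char_step c]

-- ===== VERDICT (by name: the statement is the Claim_ definition above) =====
theorem m3u_safe_py_spec : Claim_equal_m3u_safe_py := by
  intro val _
  unfold Spec_m3u_safe_py m3u_safe_py m3u_safe_py_alt pvTranslate
  match val with
  | none => rfl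
  | some s =>
    by_cases hs : s = ""
    · simp [hs]
    · simp only [hs, if_false]
      apply String.toList_inj.mp
      dsimp only
      simp only [PySem.Str.toList_strip, String.toList_ofList]
      refine congrArg PySem.Chars.strip ?_
      rw [← core_eq s.toList]
      simp only [PySem.Str.toList_replace,
        show ("\"".toList) = ['"'] from rfl, show ("\n".toList) = ['\n'] from rfl,
        show ("\r".toList) = ['\r'] from rfl, show ("".toList) = ([] : List Char) from rfl,
        show (" ".toList) = [' '] from rfl]
      rw [replace_single, replace_single, replace_single]
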